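-- pv_equiv track=rewrite | github.com/WHeerema-RUG/mathesis | lexicon/lexicon.py | feature_tally
-- ===== SOURCE A (Python) =====
-- from collections import defaultdict
--
-- def feature_tally(tagged):
--     """Look through tagged words and return two dicts of word lengths and
--     feature probabilities. Requires Brown-style tags to work
--     """
--     # Initialize dicts for collection
--     word_lens = {"noun": defaultdict(int), "verb": defaultdict(int)}
--     feat_occs = {"definite": 0, "indefinite": 0,
--                  "past": 0, "non-past": 0,
--                  "singular": 0, "plural": 0}
--     # Tag and word sets to look for in feature occurrences
--     def_tags = {"AT", "CD", "DT", "DTI", "DTS", "DTX"}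
--     indef_words = {"a", "an", "one", "some", "any"}
--     past_tags = {"VBD", "VBN"}
--     plural_tags = {"NNS", "NNS$", "NPS", "NPS$", "NRS"}
--     # Iterate through the corpus
--     for word in tagged:
--         # Get rid of hyphenated POS tags for ease of processing
--         try:
--             pos = word[1][:word[1].index("-")]
--         except ValueError:
--             pos = word[1]
--         # Skip tags with no relevance to tally
--         if len(pos) == 0:
--             continue
--         elif pos not in (def_tags or past_tags or plural_tags) \
--             and pos[0] != "N" and pos[0] != "V":
--             continue
--
--         # Accumulate word lengths for nouns and verbs
--         # To check, use the first character of the POS tag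
--         if pos[0] == "N":
--             word_lens["noun"][len(word[0])] += 1
--         elif pos[0] == "V":
--             word_lens["verb"][len(word[0])] += 1
--
--         # Check for features
--         # Definiteness
--         if pos in def_tags:
--             if word[0].lower() in indef_words:
--                 feat_occs["indefinite"] += 1
--             else:
--                 feat_occs["definite"] += 1
--         # Tense
--         if pos in past_tags:
--             feat_occs["past"] += 1
--         elif pos[0] == "V":
--             feat_occs["non-past"] += 1
--         # Plurality
--         if pos in plural_tags:
--             feat_occs["plural"] += 1
--         elif pos[0] == "N":
--             feat_occs["singular"] += 1
--     # Once all done, return everything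
--     return word_lens, feat_occs
-- ===== SOURCE B (Python) =====
-- from collections import defaultdict, Counter
--
-- DEF_TAGS = {"AT", "CD", "DT", "DTI", "DTS", "DTX"}
-- INDEF_WORDS = {"a", "an", "one", "some", "any"}
-- PAST_TAGS = {"VBD", "VBN"}
-- PLURAL_TAGS = {"NNS", "NNS$", "NPS", "NPS$", "NRS"}
--
-- def _clean(tag):
--     i = tag.find("-")
--     return tag if i == -1 else tag[:i]
--
-- def feature_tally(tagged):
--     """Two-phase tally: filter/clean once, then one dedicated pass per aggregate."""
--     kept = [(w, _clean(t)) for w, t in tagged]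
--     kept = [(w, p) for w, p in kept
--             if p and (p in DEF_TAGS or p[0] == "N" or p[0] == "V")]
--     word_lens = {
--         "noun": defaultdict(int, Counter(len(w) for w, p in kept if p[0] == "N")),
--         "verb": defaultdict(int, Counter(len(w) for w, p in kept if p[0] == "V")),
--     }
--     feat_occs = {
--         "definite": sum(1 for w, p in kept
--                         if p in DEF_TAGS and w.lower() not in INDEF_WORDS),
--         "indefinite": sum(1 for w, p in kept
--                           if p in DEF_TAGS and w.lower() in INDEF_WORDS),
--         "past": sum(1 for w, p in kept if p in PAST_TAGS),
--         "non-past": sum(1 for w, p in kept if p[0] == "V" and p not in PAST_TAGS),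
--         "singular": sum(1 for w, p in kept if p[0] == "N" and p not in PLURAL_TAGS),
--         "plural": sum(1 for w, p in kept if p in PLURAL_TAGS),
--     }
--     return word_lens, feat_occs
-- ===== Notes on version B (the rewrite author's own statement) =====
-- stated objective: alternative
-- what changed: A's single loop threading eight mutable accumulators is replaced by a clean-and-filter pass that builds the list of kept (word, pos) pairs once, followed by one dedicated pass per aggregate: Counter for the noun/verb length distributions and a counting comprehension per grammatical feature.
import Mathlib
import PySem

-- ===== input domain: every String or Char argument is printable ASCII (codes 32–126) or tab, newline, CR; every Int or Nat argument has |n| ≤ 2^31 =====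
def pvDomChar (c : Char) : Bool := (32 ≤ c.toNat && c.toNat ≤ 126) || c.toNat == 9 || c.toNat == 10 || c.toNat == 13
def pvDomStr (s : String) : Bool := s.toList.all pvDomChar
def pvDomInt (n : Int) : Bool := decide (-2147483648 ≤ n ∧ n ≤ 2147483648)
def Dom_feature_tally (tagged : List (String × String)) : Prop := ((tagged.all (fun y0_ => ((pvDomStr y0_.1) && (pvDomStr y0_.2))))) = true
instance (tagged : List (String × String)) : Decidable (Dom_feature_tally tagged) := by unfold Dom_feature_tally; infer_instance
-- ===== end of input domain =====

-- B re-decomposes A's single stateful loop into one cleaning/filtering pass plus a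
-- dedicated Counter / counting pass per aggregate (objective: alternative decomposition).

-- Shared literal constants (function-local sets in A, module-level in B; the same literals).
def defTags : List String := ["AT", "CD", "DT", "DTI", "DTS", "DTX"]
def indefWords : List String := ["a", "an", "one", "some", "any"]
def pastTags : List String := ["VBD", "VBN"]
def pluralTags : List String := ["NNS", "NNS$", "NPS", "NPS$", "NRS"]

-- tag[:tag.index("-")] with the ValueError (find = -1) falling back to tag;
-- exact for A's try/except .index and for B's `i = tag.find("-") / tag if i == -1 else tag[:i]`.
def cleanPos (tag : String) : String :=
  let i := PySem.Str.find tag "-"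
  if i == -1 then tag else PySem.Str.slice tag none (some i)

-- pos[0]; exact wherever either Python evaluates it (both guard pos ≠ "" first).
def pyHead (s : String) : Char := (PySem.Str.pyGet? s 0).getD ' '

-- ===== PORT A =====
-- state: (noun dict, verb dict, definite, indefinite, past, non-past, singular, plural)
abbrev TallySt := PySem.Dict Int Int × PySem.Dict Int Int × Int × Int × Int × Int × Int × Int

-- one iteration of A's loop body (`pos not in (def_tags or …)` evaluates to `pos not in def_tags`)
def stepA (st : TallySt) (word : String × String) : TallySt :=
  let pos := cleanPos word.2
  if PySem.Str.len pos == 0 then st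
  else if !(defTags.contains pos) && !(pyHead pos == 'N') && !(pyHead pos == 'V') then st
  else
    let (dn, dv, cdef, cindef, cpast, cnon, csing, cplur) := st
    let nv := if pyHead pos == 'N' then
                (dn.insert (PySem.Str.len word.1) (dn.getD (PySem.Str.len word.1) 0 + 1), dv)
              else if pyHead pos == 'V' then
                (dn, dv.insert (PySem.Str.len word.1) (dv.getD (PySem.Str.len word.1) 0 + 1))
              else (dn, dv)
    let di := if defTags.contains pos then
                (if indefWords.contains (PySem.Str.lower word.1) then (cdef, cindef + 1)
                 else (cdef + 1, cindef))
              else (cdef, cindef)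
    let pn := if pastTags.contains pos then (cpast + 1, cnon)
              else if pyHead pos == 'V' then (cpast, cnon + 1) else (cpast, cnon)
    let sp := if pluralTags.contains pos then (csing, cplur + 1)
              else if pyHead pos == 'N' then (csing + 1, cplur) else (csing, cplur)
    (nv.1, nv.2, di.1, di.2, pn.1, pn.2, sp.1, sp.2)

def feature_tally (tagged : List (String × String)) : (List (String × List (Int × Int))) × (List (String × Int)) :=
  let st := tagged.foldl stepA (PySem.Dict.empty, PySem.Dict.empty, 0, 0, 0, 0, 0, 0)
  ([("noun", st.1.items), ("verb", st.2.1.items)],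
   [("definite", st.2.2.1), ("indefinite", st.2.2.2.1), ("past", st.2.2.2.2.1),
    ("non-past", st.2.2.2.2.2.1), ("singular", st.2.2.2.2.2.2.1), ("plural", st.2.2.2.2.2.2.2)])

-- ===== PORT B =====
def keepPred (wp : String × String) : Bool :=
  !(wp.2 == "") && (defTags.contains wp.2 || pyHead wp.2 == 'N' || pyHead wp.2 == 'V')

def keptOf (tagged : List (String × String)) : List (String × String) :=
  ((tagged.map (fun wt => (wt.1, cleanPos wt.2))).filter keepPred)

def isNoun (wp : String × String) : Bool := pyHead wp.2 == 'N'
def isVerb (wp : String × String) : Bool := pyHead wp.2 == 'V'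
def pDef (wp : String × String) : Bool :=
  defTags.contains wp.2 && !(indefWords.contains (PySem.Str.lower wp.1))
def pIndef (wp : String × String) : Bool :=
  defTags.contains wp.2 && indefWords.contains (PySem.Str.lower wp.1)
def pPast (wp : String × String) : Bool := pastTags.contains wp.2
def pNonpast (wp : String × String) : Bool := isVerb wp && !(pastTags.contains wp.2)
def pSing (wp : String × String) : Bool := isNoun wp && !(pluralTags.contains wp.2)
def pPlur (wp : String × String) : Bool := pluralTags.contains wp.2

def feature_tally_alt (tagged : List (String × String)) : (List (String × List (Int × Int))) × (List (String × Int)) :=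
  let kept := keptOf tagged
  let nounC := PySem.Dict.counter ((kept.filter isNoun).map (fun wp => PySem.Str.len wp.1))
  let verbC := PySem.Dict.counter ((kept.filter isVerb).map (fun wp => PySem.Str.len wp.1))
  ([("noun", nounC.items), ("verb", verbC.items)],
   [("definite", (kept.countP pDef : Int)), ("indefinite", (kept.countP pIndef : Int)),
    ("past", (kept.countP pPast : Int)), ("non-past", (kept.countP pNonpast : Int)),
    ("singular", (kept.countP pSing : Int)), ("plural", (kept.countP pPlur : Int))])

-- ===== PRECONDITION & SPEC =====
def Spec_feature_tally (tagged : List (String × String)) (out : (List (String × List (Int × Int))) × (List (String × Int))) : Prop := out = feature_tally_alt tagged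
instance (tagged : List (String × String)) (out : (List (String × List (Int × Int))) × (List (String × Int))) : Decidable (Spec_feature_tally tagged out) := by unfold Spec_feature_tally; infer_instance

-- ===== CLAIM (what is proved, stated in full; the proofs are below) =====
def Claim_equal_feature_tally : Prop := ∀ (tagged : List (String × String)), Dom_feature_tally tagged → Spec_feature_tally tagged (feature_tally tagged)

-- ===== LEMMAS AND PROOFS =====
def cntStep (d : PySem.Dict Int Int) (n : Int) : PySem.Dict Int Int :=
  d.insert n (d.getD n 0 + 1)

lemma len_beq_zero (s : String) : (PySem.Str.len s == 0) = (s == "") := by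
  rcases s with ⟨cs⟩
  cases cs <;> simp [PySem.Str.len_eq]

lemma keptOf_cons (x : String × String) (l : List (String × String)) :
    keptOf (x :: l) =
      if keepPred (x.1, cleanPos x.2) then (x.1, cleanPos x.2) :: keptOf l else keptOf l := by
  simp [keptOf, List.filter_cons]

lemma stepA_skip (st : TallySt) (w : String × String)
    (h : keepPred (w.1, cleanPos w.2) = false) : stepA st w = st := by
  obtain ⟨dn, dv, a, b, c, d, e, f⟩ := st
  simp only [keepPred] at h
  simp only [stepA, len_beq_zero]
  by_cases h0 : (cleanPos w.2 == "") = true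
  · simp [h0]
  · rw [Bool.not_eq_true] at h0
    simp only [h0, Bool.not_false, Bool.true_and, Bool.or_eq_false_iff] at h
    obtain ⟨⟨h1, h2⟩, h3⟩ := h
    have h1' : cleanPos w.2 ∉ defTags := by simpa using h1
    simp [h0, h1', h2, h3]

lemma not_noun_verb (wp : String × String) (h : isNoun wp = true) : isVerb wp = false := by
  simp only [isNoun, beq_iff_eq] at h
  simp [isVerb, h]

set_option maxHeartbeats 800000 in
lemma stepA_keep (dn dv : PySem.Dict Int Int) (a b c d e f : Int) (w : String × String)
    (h : keepPred (w.1, cleanPos w.2) = true) :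
    stepA (dn, dv, a, b, c, d, e, f) w =
      ((if isNoun (w.1, cleanPos w.2) then cntStep dn (PySem.Str.len w.1) else dn),
       (if isNoun (w.1, cleanPos w.2) then dv
        else if isVerb (w.1, cleanPos w.2) then cntStep dv (PySem.Str.len w.1) else dv),
       a + (if pDef (w.1, cleanPos w.2) then 1 else 0),
       b + (if pIndef (w.1, cleanPos w.2) then 1 else 0),
       c + (if pPast (w.1, cleanPos w.2) then 1 else 0),
       d + (if pNonpast (w.1, cleanPos w.2) then 1 else 0),
       e + (if pSing (w.1, cleanPos w.2) then 1 else 0),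
       f + (if pPlur (w.1, cleanPos w.2) then 1 else 0)) := by
  have h0 : (cleanPos w.2 == "") = false := by
    revert h; unfold keepPred
    cases hc : (cleanPos w.2 == "") <;> simp
  have hguard : (!defTags.contains (cleanPos w.2) && !(pyHead (cleanPos w.2) == 'N') &&
      !(pyHead (cleanPos w.2) == 'V')) = false := by
    revert h; unfold keepPred
    cases defTags.contains (cleanPos w.2) <;> cases hn : (pyHead (cleanPos w.2) == 'N') <;>
      cases hv : (pyHead (cleanPos w.2) == 'V') <;> simp
  simp only [stepA, len_beq_zero, h0, hguard, Bool.false_eq_true, if_false]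
  simp only [isNoun, isVerb, pDef, pIndef, pPast, pNonpast, pSing, pPlur, cntStep]
  by_cases hN : (pyHead (cleanPos w.2) == 'N') = true <;>
    by_cases hV : (pyHead (cleanPos w.2) == 'V') = true <;>
    by_cases hD : defTags.contains (cleanPos w.2) = true <;>
    by_cases hI : indefWords.contains (PySem.Str.lower w.1) = true <;>
    by_cases hP : pastTags.contains (cleanPos w.2) = true <;>
    by_cases hPl : pluralTags.contains (cleanPos w.2) = true <;>
    simp_all

set_option maxHeartbeats 800000 in
lemma foldA_eq (l : List (String × String)) (dn dv : PySem.Dict Int Int)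
    (a b c d e f : Int) :
    l.foldl stepA (dn, dv, a, b, c, d, e, f) =
      (((keptOf l).filter isNoun |>.map (fun wp => PySem.Str.len wp.1)).foldl cntStep dn,
       ((keptOf l).filter isVerb |>.map (fun wp => PySem.Str.len wp.1)).foldl cntStep dv,
       a + ((keptOf l).countP pDef : Int), b + ((keptOf l).countP pIndef : Int),
       c + ((keptOf l).countP pPast : Int), d + ((keptOf l).countP pNonpast : Int),
       e + ((keptOf l).countP pSing : Int), f + ((keptOf l).countP pPlur : Int)) := by
  induction l generalizing dn dv a b c d e f with
  | nil => simp [keptOf]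
  | cons x l ih =>
    rw [List.foldl_cons, keptOf_cons]
    by_cases hk : keepPred (x.1, cleanPos x.2) = true
    · rw [stepA_keep dn dv a b c d e f x hk, ih]
      simp only [hk, if_true, List.filter_cons, List.countP_cons]
      refine Prod.ext ?_ (Prod.ext ?_ (Prod.ext ?_ (Prod.ext ?_ (Prod.ext ?_
        (Prod.ext ?_ (Prod.ext ?_ ?_))))))
      · by_cases hN : isNoun (x.1, cleanPos x.2) <;> simp [hN]
      · by_cases hN : isNoun (x.1, cleanPos x.2)
        · simp [hN, not_noun_verb _ hN]
        · by_cases hV : isVerb (x.1, cleanPos x.2) <;> simp [hN, hV]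
      all_goals (push_cast; split_ifs <;> omega)
    · rw [Bool.not_eq_true] at hk
      rw [stepA_skip _ x hk, ih]
      simp [hk]

-- ===== VERDICT (by name: the statement is the Claim_ definition above) =====
theorem feature_tally_spec : Claim_equal_feature_tally := by
  intro tagged _
  unfold Spec_feature_tally feature_tally feature_tally_alt
  rw [foldA_eq]
  simp only [← PySem.Dict.foldl_insert_getD_add_one_eq_counter, zero_add]
  rfl
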